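-- pv_equiv track=rewrite | github.com/steliarix/semantic-search | src/codesense/parsers/python_parsers.py | _is_django_view
-- ===== SOURCE A (Python) =====
-- def _is_django_view(base_classes: list[str]) -> bool:
--     """Check if class is a Django view."""
--     django_view_bases = [
--         "APIView", "ViewSet", "ModelViewSet", "ReadOnlyModelViewSet",
--         "GenericViewSet", "View", "ListView", "DetailView", "CreateView",
--         "UpdateView", "DeleteView", "TemplateView",
--     ]
--     return any(
--         any(base_pattern in base for base_pattern in django_view_bases)
--         for base in base_classes
--     )
-- ===== SOURCE B (Python) =====
-- def _is_django_view(base_classes: list[str]) -> bool: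
--     """Check if class is a Django view."""
--     # Every name in A's pattern list contains "View", and "View" itself is a
--     # pattern, so scanning for the single substring "View" is equivalent.
--     return any("View" in base for base in base_classes)
-- ===== Notes on version B (the rewrite author's own statement) =====
-- stated objective: simpler
-- what changed: Replaced the nested any over the 12-name pattern list with a single substring test: every pattern contains "View" and "View" is itself a pattern, so the whole list collapses to one 'View' in base check per base class.
import Mathlib
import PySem

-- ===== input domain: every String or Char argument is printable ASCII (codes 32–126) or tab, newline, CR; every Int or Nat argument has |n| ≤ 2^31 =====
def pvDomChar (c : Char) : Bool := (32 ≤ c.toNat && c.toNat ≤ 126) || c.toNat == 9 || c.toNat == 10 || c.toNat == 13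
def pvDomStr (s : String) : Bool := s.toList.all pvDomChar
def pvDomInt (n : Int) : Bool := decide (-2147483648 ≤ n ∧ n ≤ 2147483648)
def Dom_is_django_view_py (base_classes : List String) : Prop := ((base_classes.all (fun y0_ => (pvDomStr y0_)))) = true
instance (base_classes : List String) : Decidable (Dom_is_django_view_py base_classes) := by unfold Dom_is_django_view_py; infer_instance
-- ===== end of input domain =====

-- B replaces A's scan over the 12-name pattern list with a single "View" substring test
-- (every pattern contains "View" and "View" is itself a pattern): simpler, one scan per base.

-- ===== PORT A =====
def is_django_view_py (base_classes : List String) : Bool :=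
  let django_view_bases : List String :=
    ["APIView", "ViewSet", "ModelViewSet", "ReadOnlyModelViewSet",
     "GenericViewSet", "View", "ListView", "DetailView", "CreateView",
     "UpdateView", "DeleteView", "TemplateView"]
  base_classes.any (fun base =>
    django_view_bases.any (fun base_pattern => PySem.Str.isIn base_pattern base))

-- ===== PORT B =====
def is_django_view_py_alt (base_classes : List String) : Bool :=
  base_classes.any (fun base => PySem.Str.isIn "View" base)

-- ===== PRECONDITION & SPEC =====
def Spec_is_django_view_py (base_classes : List String) (out : Bool) : Prop := out = is_django_view_py_alt base_classes
instance (base_classes : List String) (out : Bool) : Decidable (Spec_is_django_view_py base_classes out) := by unfold Spec_is_django_view_py; infer_instance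

-- ===== CLAIM (what is proved, stated in full; the proofs are below) =====
def Claim_equal_is_django_view_py : Prop := ∀ (base_classes : List String), Dom_is_django_view_py base_classes → Spec_is_django_view_py base_classes (is_django_view_py base_classes)

-- ===== LEMMAS AND PROOFS =====

-- The inner any over A's pattern list equals the single "View" test:
-- "View" is a pattern (⇐), and every pattern has "View" as a substring (⇒, by transitivity of infix).
theorem pv_inner_eq (base : String) :
    (["APIView", "ViewSet", "ModelViewSet", "ReadOnlyModelViewSet",
      "GenericViewSet", "View", "ListView", "DetailView", "CreateView",
      "UpdateView", "DeleteView", "TemplateView"] : List String).any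
        (fun base_pattern => PySem.Str.isIn base_pattern base)
      = PySem.Str.isIn "View" base := by
  rw [Bool.eq_iff_iff]
  constructor
  · intro h
    rw [List.any_eq_true] at h
    obtain ⟨p, hp, hin⟩ := h
    rw [PySem.Str.isIn_iff_infix] at hin ⊢
    have hview : ("View" : String).toList <:+: p.toList := by
      fin_cases hp <;> decide
    exact hview.trans hin
  · intro h
    rw [List.any_eq_true]
    exact ⟨"View", by decide, h⟩

-- ===== VERDICT (by name: the statement is the Claim_ definition above) =====
theorem is_django_view_py_spec : Claim_equal_is_django_view_py := by
  intro base_classes _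
  unfold Spec_is_django_view_py is_django_view_py is_django_view_py_alt
  simp only [pv_inner_eq]
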